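-- pv_equiv track=rewrite | github.com/Broseph94/notion-todo-capture-workflow | scripts/capture_to_notion.py | find_property_by_alias
-- ===== SOURCE A (Python) =====
-- from typing import Any
--
-- def normalized_name(name: str) -> str:
--     return "".join(ch for ch in name.casefold() if ch.isalnum())
--
-- def find_property_by_alias(schema: dict[str, Any], aliases: tuple[str, ...], allowed_types: set[str]) -> str | None:
--     normalized_to_name = {normalized_name(name): name for name in schema}
--     for alias in aliases:
--         name = normalized_to_name.get(normalized_name(alias))
--         if not name:
--             continue
--         prop_type = schema[name].get("type")
--         if prop_type in allowed_types:
--             return name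
--     return None
-- ===== SOURCE B (Python) =====
-- def normalized_name(name: str) -> str:
--     return "".join(ch for ch in name.casefold() if ch.isalnum())
--
-- def find_property_by_alias(schema, aliases, allowed_types):
--     # Inverted traversal: index the aliases once by normalized form (first
--     # occurrence keeps its position), then make a single pass over the schema
--     # and keep the allowed-type property whose alias appears earliest.
--     rank = {}
--     for i, alias in enumerate(aliases):
--         rank.setdefault(normalized_name(alias), i)
--     best = None
--     best_rank = len(aliases)
--     for name, prop in schema.items():
--         if prop.get("type") not in allowed_types:
--             continue
--         r = rank.get(normalized_name(name))
--         if r is not None and r < best_rank: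
--             best, best_rank = name, r
--     return best
-- ===== Notes on version B (the rewrite author's own statement) =====
-- stated objective: alternative
-- what changed: B inverts the traversal: instead of a normalized-name->property index probed per alias, it indexes the aliases by normalized form (first occurrence) and makes one pass over the schema keeping the allowed-type property with the earliest alias; Pre_ excludes schemas with an empty property name or two property names sharing a normalized form, where A's falsy-name skip and dict-reinsertion last-wins are accidental.
-- outside the precondition, e.g. on find_property_by_alias({'': {'type': 'rich_text'}}, ('!',), {'rich_text'}): A returns None, B returns ''
import Mathlib
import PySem

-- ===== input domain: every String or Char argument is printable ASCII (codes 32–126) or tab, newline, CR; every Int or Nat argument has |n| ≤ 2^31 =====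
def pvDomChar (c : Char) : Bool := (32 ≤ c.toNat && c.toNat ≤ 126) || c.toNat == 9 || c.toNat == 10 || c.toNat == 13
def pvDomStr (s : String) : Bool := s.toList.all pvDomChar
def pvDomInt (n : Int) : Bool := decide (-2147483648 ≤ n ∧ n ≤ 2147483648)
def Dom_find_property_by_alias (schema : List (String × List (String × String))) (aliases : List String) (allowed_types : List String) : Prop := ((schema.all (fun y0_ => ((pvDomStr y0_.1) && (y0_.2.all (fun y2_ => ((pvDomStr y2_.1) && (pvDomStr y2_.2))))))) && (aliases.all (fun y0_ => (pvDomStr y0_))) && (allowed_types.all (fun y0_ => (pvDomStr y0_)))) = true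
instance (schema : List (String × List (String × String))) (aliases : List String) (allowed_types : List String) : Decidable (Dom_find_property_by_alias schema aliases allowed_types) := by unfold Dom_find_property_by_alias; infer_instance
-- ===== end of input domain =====

-- B inverts the traversal (index the aliases once, one pass over the schema) instead of
-- A's normalized-schema-key index probed per alias; equal on Pre_ (no empty property name,
-- no two property names with the same normalized form).

-- normalized_name: casefold then keep alphanumerics; on the ASCII domain casefold = lower (exact there)
def pvNorm (s : String) : String :=
  String.ofList (((PySem.Str.lower s).toList).filter PySem.Str.isalnum)

-- prop.get("type") in allowed_types  (allowed_types is a Python set of strings, so a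
-- missing "type" key — Python None — is never a member)
def pvTypeOkProp (allowed_types : List String) (prop : List (String × String)) : Bool :=
  match (PySem.Dict.ofList prop).get? "type" with
  | some t => PySem.Set.contains allowed_types t
  | none => false

-- ===== PORT A =====
-- schema[name].get("type") in allowed_types
def pvTypeOk (d : PySem.Dict String (List (String × String))) (allowed_types : List String) (name : String) : Bool :=
  pvTypeOkProp allowed_types (d.getD name [])

-- {normalized_name(name): name for name in schema}
def pvN2N (d : PySem.Dict String (List (String × String))) : PySem.Dict String String :=
  d.keys.foldl (fun m name => m.insert (pvNorm name) name) PySem.Dict.empty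

def pvLoopA (n2n : PySem.Dict String String) (d : PySem.Dict String (List (String × String))) (allowed_types : List String) : List String → Option String
  | [] => none
  | alias_ :: rest =>
    match n2n.get? (pvNorm alias_) with
    | none => pvLoopA n2n d allowed_types rest          -- .get miss: falsy, continue
    | some name =>
      if name = "" then pvLoopA n2n d allowed_types rest -- falsy string, continue
      else if pvTypeOk d allowed_types name then some name
      else pvLoopA n2n d allowed_types rest

def find_property_by_alias (schema : List (String × List (String × String))) (aliases : List String) (allowed_types : List String) : Option String :=
  pvLoopA (pvN2N (PySem.Dict.ofList schema)) (PySem.Dict.ofList schema) allowed_types aliases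

-- ===== PORT B =====
-- rank = {}; for i, alias in enumerate(aliases): rank.setdefault(normalized_name(alias), i)
def pvRankB (aliases : List String) : PySem.Dict String Int :=
  (PySem.List.enumerate aliases).foldl (fun m p => m.setdefault (pvNorm p.2) p.1) PySem.Dict.empty

-- loop body: skip disallowed types, keep (name, r) when r is a new minimum
def pvStepB (rank : PySem.Dict String Int) (allowed_types : List String) (b : Option String × Int) (q : String × List (String × String)) : Option String × Int :=
  if pvTypeOkProp allowed_types q.2 = false then b      -- continue
  else match rank.get? (pvNorm q.1) with
    | some r => if r < b.2 then (some q.1, r) else b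
    | none => b

def find_property_by_alias_alt (schema : List (String × List (String × String))) (aliases : List String) (allowed_types : List String) : Option String :=
  (((PySem.Dict.ofList schema).items).foldl
      (pvStepB (pvRankB aliases) allowed_types)
      (none, PySem.List.len aliases)).1

-- ===== PRECONDITION & SPEC =====
-- Pre_ excludes schemas with an empty property name or with two property names sharing a
-- normalized form: there A's falsy-name skip and its dict-reinsertion last-wins on collisions
-- are accidental, and B's alias-rank choice is as defensible.
def Pre_find_property_by_alias (schema : List (String × List (String × String))) (aliases : List String) (allowed_types : List String) : Prop :=
  "" ∉ (PySem.Dict.ofList schema).keys ∧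
    (((PySem.Dict.ofList schema).keys).map pvNorm).Nodup
instance (schema : List (String × List (String × String))) (aliases : List String) (allowed_types : List String) : Decidable (Pre_find_property_by_alias schema aliases allowed_types) := by unfold Pre_find_property_by_alias; infer_instance

def pvWitness_find_property_by_alias : (List (String × List (String × String))) × List String × List String :=
  ([("Due Date", [("type", "date")]), ("Note", [("type", "rich_text")])], ["note", "duedate"], ["rich_text", "title"])

def Spec_find_property_by_alias (schema : List (String × List (String × String))) (aliases : List String) (allowed_types : List String) (out : Option String) : Prop := out = find_property_by_alias_alt schema aliases allowed_types
instance (schema : List (String × List (String × String))) (aliases : List String) (allowed_types : List String) (out : Option String) : Decidable (Spec_find_property_by_alias schema aliases allowed_types out) := by unfold Spec_find_property_by_alias; infer_instance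

-- ===== CLAIM (what is proved, stated in full; the proofs are below) =====
def Claim_equal_find_property_by_alias : Prop := ∀ (schema : List (String × List (String × String))) (aliases : List String) (allowed_types : List String), Dom_find_property_by_alias schema aliases allowed_types → Pre_find_property_by_alias schema aliases allowed_types → Spec_find_property_by_alias schema aliases allowed_types (find_property_by_alias schema aliases allowed_types)

-- ===== LEMMAS AND PROOFS =====

-- first schema key whose normalized form is t
def pvHit (ks : List String) (t : String) : Option String :=
  ks.find? (fun n => pvNorm n == t)

-- what one iteration of A's alias loop yields for an alias
def pvG (ks : List String) (d : PySem.Dict String (List (String × String))) (allowed_types : List String) (a : String) : Option String :=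
  match pvHit ks (pvNorm a) with
  | some n => if pvTypeOk d allowed_types n then some n else none
  | none => none

-- last-wins scan (the value A's reverse dict stores at a normalized key)
def pvLastHit (pairs : List (String × String)) (t : String) : Option String :=
  pairs.foldl (fun acc p => if p.1 = t then some p.2 else acc) none

theorem pv_lastHit_foldl_acc (pairs : List (String × String)) (a : Option String) (t : String) :
    pairs.foldl (fun acc p => if p.1 = t then some p.2 else acc) a
      = (pvLastHit pairs t).orElse (fun _ => a) := by
  induction pairs generalizing a with
  | nil => simp [pvLastHit, Option.orElse]
  | cons p rest ih =>
    simp only [pvLastHit, List.foldl_cons] at *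
    rw [ih (if p.1 = t then some p.2 else a), ih (if p.1 = t then some p.2 else none)]
    cases rest.foldl (fun acc p => if p.1 = t then some p.2 else acc) none <;>
      by_cases h : p.1 = t <;> simp [h, Option.orElse]

theorem pv_lastHit_none (pairs : List (String × String)) (t : String)
    (h : t ∉ pairs.map Prod.fst) : pvLastHit pairs t = none := by
  induction pairs with
  | nil => rfl
  | cons p rest ih =>
    simp only [List.map_cons, List.mem_cons, not_or] at h
    simp only [pvLastHit, List.foldl_cons]
    rw [pv_lastHit_foldl_acc, ih h.2]
    simp [Ne.symm h.1, Option.orElse]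

-- with pairwise-distinct first components, last match = first match
theorem pv_lastHit_eq_find? (pairs : List (String × String)) (t : String)
    (h : (pairs.map Prod.fst).Nodup) :
    pvLastHit pairs t = (pairs.find? (fun p => p.1 == t)).map Prod.snd := by
  induction pairs with
  | nil => rfl
  | cons p rest ih =>
    simp only [List.map_cons, List.nodup_cons] at h
    simp only [pvLastHit, List.foldl_cons]
    rw [pv_lastHit_foldl_acc]
    by_cases hp : p.1 = t
    · rw [show pvLastHit rest t = none from pv_lastHit_none rest t (hp ▸ h.1)]
      simp [List.find?_cons_of_pos, hp, Option.orElse]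
    · rw [List.find?_cons_of_neg (by simpa using hp), ← ih h.2]
      cases pvLastHit rest t <;> simp [Option.orElse, hp]

-- A's reverse index looked up at a key, as a last-wins scan
theorem pv_get?_foldl_insert (keys : List String) (m : PySem.Dict String String) (t : String) :
    (keys.foldl (fun m name => m.insert (pvNorm name) name) m).get? t
      = (pvLastHit (keys.map (fun n => (pvNorm n, n))) t).orElse (fun _ => m.get? t) := by
  induction keys generalizing m with
  | nil => simp [pvLastHit, Option.orElse]
  | cons k ks ih =>
    simp only [List.foldl_cons, List.map_cons]
    rw [ih]
    have hm : pvLastHit ((pvNorm k, k) :: ks.map (fun n => (pvNorm n, n))) t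
        = (pvLastHit (ks.map (fun n => (pvNorm n, n))) t).orElse
            (fun _ => if pvNorm k = t then some k else none) := by
      simp only [pvLastHit, List.foldl_cons]
      exact pv_lastHit_foldl_acc _ _ _
    rw [hm, PySem.Dict.get?_insert]
    cases pvLastHit (ks.map (fun n => (pvNorm n, n))) t <;>
      by_cases h : pvNorm k = t <;> simp [h, Ne.symm, Option.orElse]

-- under Pre_'s nodup hypothesis the reverse index IS pvHit
theorem pv_n2n_get? (d : PySem.Dict String (List (String × String))) (t : String)
    (hno : ((d.keys).map pvNorm).Nodup) :
    (pvN2N d).get? t = pvHit d.keys t := by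
  unfold pvN2N pvHit
  rw [pv_get?_foldl_insert, PySem.Dict.get?_empty]
  have hfst : (d.keys.map (fun n => (pvNorm n, n))).map Prod.fst = d.keys.map pvNorm := by
    simp [List.map_map, Function.comp]
  rw [pv_lastHit_eq_find? _ _ (by rw [hfst]; exact hno)]
  rw [List.find?_map]
  have hcomp : ((fun (p : String × String) => p.1 == t) ∘ fun n => (pvNorm n, n))
      = (fun n => pvNorm n == t) := rfl
  rw [hcomp]
  cases h : d.keys.find? (fun n => pvNorm n == t) <;> simp [Option.orElse]

theorem pv_hit_spec (ks : List String) (t n : String) (h : pvHit ks t = some n) :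
    n ∈ ks ∧ pvNorm n = t :=
  ⟨List.mem_of_find?_eq_some h, by simpa using List.find?_some h⟩

theorem pv_hit_self (ks : List String) (n : String) (hno : (ks.map pvNorm).Nodup)
    (hn : n ∈ ks) : pvHit ks (pvNorm n) = some n := by
  have hs : (pvHit ks (pvNorm n)).isSome := by
    unfold pvHit
    exact List.find?_isSome.2 ⟨n, hn, by simp⟩
  obtain ⟨m, hm⟩ := Option.isSome_iff_exists.1 hs
  obtain ⟨hmem, hnorm⟩ := pv_hit_spec ks (pvNorm n) m hm
  rw [hm, List.inj_on_of_nodup_map hno hmem hn hnorm]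

-- A's alias loop is findSome? of pvG (no key is "" so the falsy guard never fires)
theorem pv_loopA_eq_findSome? (d : PySem.Dict String (List (String × String)))
    (allowed_types : List String) (aliases : List String)
    (hno : ((d.keys).map pvNorm).Nodup) (hne : "" ∉ d.keys) :
    pvLoopA (pvN2N d) d allowed_types aliases = aliases.findSome? (pvG d.keys d allowed_types) := by
  induction aliases with
  | nil => rfl
  | cons a rest ih =>
    simp only [pvLoopA, List.findSome?_cons, pv_n2n_get? d _ hno, ih]
    unfold pvG
    cases hh : pvHit d.keys (pvNorm a) with
    | none => rfl
    | some n =>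
      have hnn : ¬ n = "" := fun he => hne (he ▸ (pv_hit_spec _ _ _ hh).1)
      simp only [hnn, if_false]
      cases pvTypeOk d allowed_types n <;> simp

-- B's alias-rank index looked up at a key: first enumerate entry with that normalized form
theorem pv_rank_get? (l : List (Int × String)) (m : PySem.Dict String Int) (t : String) :
    (l.foldl (fun m p => m.setdefault (pvNorm p.2) p.1) m).get? t
      = (m.get? t).or ((l.find? (fun p => pvNorm p.2 == t)).map Prod.fst) := by
  induction l generalizing m with
  | nil => simp
  | cons p rest ih =>
    simp only [List.foldl_cons]
    rw [ih]
    by_cases hp : pvNorm p.2 = t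
    · rw [show (m.setdefault (pvNorm p.2) p.1).get? t = some ((m.get? t).getD p.1) from
        hp ▸ PySem.Dict.get?_setdefault_self m (pvNorm p.2) p.1]
      rw [List.find?_cons_of_pos (by simpa using hp)]
      cases m.get? t <;> simp
    · rw [PySem.Dict.get?_setdefault_of_ne m p.1 (Ne.symm hp),
        List.find?_cons_of_neg (by simpa using hp)]

theorem pv_rankB_get? (aliases : List String) (t : String) :
    (pvRankB aliases).get? t
      = ((PySem.List.enumerate aliases).find? (fun p => pvNorm p.2 == t)).map Prod.fst := by
  unfold pvRankB
  rw [pv_rank_get?, PySem.Dict.get?_empty]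
  rfl

-- any rank value names an alias with that normalized form
theorem pv_rank_mem (aliases : List String) (t : String) (s : Int)
    (h : (pvRankB aliases).get? t = some s) :
    ∃ (k : Nat) (hk : k < aliases.length), s = (k : Int) ∧ pvNorm aliases[k] = t := by
  rw [pv_rankB_get?] at h
  obtain ⟨p, hp, hfst⟩ := Option.map_eq_some_iff.1 h
  have hmem := List.mem_of_find?_eq_some hp
  have hpred := List.find?_some hp
  rw [PySem.List.mem_enumerate_iff] at hmem
  obtain ⟨k, hk, hpk⟩ := hmem
  refine ⟨k, hk, ?_, ?_⟩
  · rw [← hfst, hpk]; simp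
  · have : pvNorm p.2 = t := by simpa using hpred
    rw [hpk] at this; simpa using this

-- fold-state laws for B's single pass ------------------------------------------------

theorem pv_stepB_skip (rank : PySem.Dict String Int) (allowed_types : List String)
    (b : Option String × Int) (q : String × List (String × String))
    (h : ∀ s, ¬ (pvTypeOkProp allowed_types q.2 = true ∧ rank.get? (pvNorm q.1) = some s)) :
    pvStepB rank allowed_types b q = b := by
  unfold pvStepB
  cases hok : pvTypeOkProp allowed_types q.2 with
  | false => simp
  | true =>
    simp only [Bool.true_eq_false, if_false]
    cases hr : rank.get? (pvNorm q.1) with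
    | none => rfl
    | some s => exact absurd ⟨hok, hr⟩ (h s)

theorem pv_foldB_keep (rank : PySem.Dict String Int) (allowed_types : List String)
    (items : List (String × List (String × String))) (n : String) (r : Int)
    (H : ∀ q ∈ items, ∀ s, pvTypeOkProp allowed_types q.2 = true →
          rank.get? (pvNorm q.1) = some s → r ≤ s) :
    items.foldl (pvStepB rank allowed_types) (some n, r) = (some n, r) := by
  induction items with
  | nil => rfl
  | cons q rest ih =>
    have hq : pvStepB rank allowed_types (some n, r) q = (some n, r) := by
      unfold pvStepB
      cases hok : pvTypeOkProp allowed_types q.2 with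
      | false => simp
      | true =>
        simp only [Bool.true_eq_false, if_false]
        cases hr : rank.get? (pvNorm q.1) with
        | none => rfl
        | some s =>
          have := H q (List.mem_cons_self) s hok hr
          simp only []
          rw [if_neg (by omega)]
    simp only [List.foldl_cons, hq]
    exact ih (fun q hq' s => H q (List.mem_cons_of_mem _ hq') s)

theorem pv_foldB_none (rank : PySem.Dict String Int) (allowed_types : List String)
    (items : List (String × List (String × String))) (b : Option String × Int)
    (H : ∀ q ∈ items, ∀ s, ¬ (pvTypeOkProp allowed_types q.2 = true ∧
          rank.get? (pvNorm q.1) = some s)) :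
    items.foldl (pvStepB rank allowed_types) b = b := by
  induction items generalizing b with
  | nil => rfl
  | cons q rest ih =>
    rw [List.foldl_cons, pv_stepB_skip rank allowed_types b q (H q List.mem_cons_self), ih]
    exact fun q hq' => H q (List.mem_cons_of_mem _ hq')

theorem pv_foldB_main (rank : PySem.Dict String Int) (allowed_types : List String)
    (items : List (String × List (String × String))) (b : Option String × Int)
    (n : String) (pn : List (String × String)) (r : Int)
    (hmem : (n, pn) ∈ items)
    (hcand : pvTypeOkProp allowed_types pn = true ∧ rank.get? (pvNorm n) = some r)
    (H : ∀ q ∈ items, ∀ s, pvTypeOkProp allowed_types q.2 = true →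
          rank.get? (pvNorm q.1) = some s → r ≤ s ∧ (s = r → q = (n, pn)))
    (hb : r < b.2) :
    (items.foldl (pvStepB rank allowed_types) b).1 = some n := by
  induction items generalizing b with
  | nil => exact absurd hmem (List.not_mem_nil)
  | cons q rest ih =>
    rw [List.foldl_cons]
    by_cases hq : q = (n, pn)
    · subst hq
      have hstep : pvStepB rank allowed_types b (n, pn) = (some n, r) := by
        unfold pvStepB
        simp only [hcand.1, hcand.2, Bool.true_eq_false, if_false]
        rw [if_pos hb]
      rw [hstep, pv_foldB_keep rank allowed_types rest n r
        (fun q hq' s hok hr => (H q (List.mem_cons_of_mem _ hq') s hok hr).1)]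
    · have hmem' : (n, pn) ∈ rest := by
        rcases List.mem_cons.1 hmem with h | h
        · exact absurd h.symm hq
        · exact h
      have H' : ∀ q' ∈ rest, ∀ s, pvTypeOkProp allowed_types q'.2 = true →
          rank.get? (pvNorm q'.1) = some s → r ≤ s ∧ (s = r → q' = (n, pn)) :=
        fun q' hq' s => H q' (List.mem_cons_of_mem _ hq') s
      cases hok : pvTypeOkProp allowed_types q.2 with
      | false =>
        rw [show pvStepB rank allowed_types b q = b by unfold pvStepB; simp [hok]]
        exact ih b hmem' H' hb
      | true =>
        cases hr : rank.get? (pvNorm q.1) with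
        | none =>
          rw [show pvStepB rank allowed_types b q = b by unfold pvStepB; simp [hok, hr]]
          exact ih b hmem' H' hb
        | some s =>
          have hrs := H q List.mem_cons_self s hok hr
          have hlt : r < s := by
            rcases lt_or_eq_of_le hrs.1 with h | h
            · exact h
            · exact absurd (hrs.2 h.symm) hq
          have hstep : pvStepB rank allowed_types b q
              = if s < b.2 then (some q.1, s) else b := by
            unfold pvStepB; simp [hok, hr]
          rw [hstep]
          by_cases hsb : s < b.2
          · rw [if_pos hsb]
            exact ih (some q.1, s) hmem' H' hlt
          · rw [if_neg hsb]
            exact ih b hmem' H' hb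

theorem pvG_of_hit_some (ks : List String) (d : PySem.Dict String (List (String × String)))
    (allowed_types : List String) (a n : String) (hh : pvHit ks (pvNorm a) = some n) :
    pvG ks d allowed_types a = if pvTypeOk d allowed_types n then some n else none := by
  unfold pvG
  rw [hh]

-- ===== VERDICT (by name: the statement is the Claim_ definition above) =====
theorem find_property_by_alias_spec : Claim_equal_find_property_by_alias := by
  intro schema aliases allowed_types _ hpre
  obtain ⟨hne, hno⟩ := hpre
  unfold Spec_find_property_by_alias find_property_by_alias find_property_by_alias_alt
  set d := PySem.Dict.ofList schema with hd
  have hksnd : d.keys.Nodup := PySem.Dict.nodup_keys_ofList schema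
  have hitems : d.items = d.keys.map (fun k => (k, d.getD k [])) :=
    PySem.Dict.items_eq_map_keys d hksnd []
  have hitem_fact : ∀ q ∈ d.items, q.1 ∈ d.keys ∧ q.2 = d.getD q.1 [] := by
    intro q hq
    rw [hitems] at hq
    obtain ⟨k, hk, hqe⟩ := List.mem_map.1 hq
    subst hqe
    exact ⟨hk, rfl⟩
  rw [pv_loopA_eq_findSome? d allowed_types aliases hno hne]
  cases hA : aliases.findSome? (pvG d.keys d allowed_types) with
  | none =>
    have hall := List.findSome?_eq_none_iff.1 hA
    have hnc : ∀ q ∈ d.items, ∀ s : Int, ¬ (pvTypeOkProp allowed_types q.2 = true ∧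
        (pvRankB aliases).get? (pvNorm q.1) = some s) := by
      rintro q hq s ⟨hok, hr⟩
      obtain ⟨hkmem, hq2⟩ := hitem_fact q hq
      obtain ⟨k, hk, _, hnorm⟩ := pv_rank_mem aliases (pvNorm q.1) s hr
      have hga := hall aliases[k] (List.getElem_mem hk)
      rw [pvG_of_hit_some d.keys d allowed_types aliases[k] q.1
        (by rw [hnorm]; exact pv_hit_self d.keys q.1 hno hkmem)] at hga
      have hok' : pvTypeOk d allowed_types q.1 = true := by
        unfold pvTypeOk; rw [← hq2]; exact hok
      rw [hok'] at hga
      simp at hga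
    rw [pv_foldB_none (pvRankB aliases) allowed_types d.items _ hnc]
  | some n =>
    obtain ⟨pre, a, post, heq, hga, hpre_none⟩ := List.findSome?_eq_some_iff.1 hA
    obtain ⟨n', hh⟩ : ∃ n', pvHit d.keys (pvNorm a) = some n' := by
      unfold pvG at hga
      cases hh0 : pvHit d.keys (pvNorm a) with
      | none => rw [hh0] at hga; exact absurd hga (by simp)
      | some m => exact ⟨m, rfl⟩
    rw [pvG_of_hit_some d.keys d allowed_types a n' hh] at hga
    cases hok : pvTypeOk d allowed_types n' with
    | false => rw [hok] at hga; exact absurd hga (by simp)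
    | true =>
    rw [hok, if_pos rfl] at hga
    have hn'n : n = n' := by simpa using hga.symm
    subst hn'n
    obtain ⟨hnks, hnna⟩ := pv_hit_spec d.keys (pvNorm a) n hh
    -- no alias in pre shares a's normalized form
    have hpre_norm : ∀ x ∈ pre, pvNorm x ≠ pvNorm a := by
      intro x hx hxa
      have hgx := hpre_none x hx
      rw [pvG_of_hit_some d.keys d allowed_types x n (by rw [hxa]; exact hh), hok,
        if_pos rfl] at hgx
      exact absurd hgx (by simp)
    -- rank at pvNorm a is pre.length
    have hrank : (pvRankB aliases).get? (pvNorm a) = some (pre.length : Int) := by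
      rw [pv_rankB_get?, heq, PySem.List.enumerate_append, List.find?_append]
      have h1 : (PySem.List.enumerate pre 0).find? (fun p => pvNorm p.2 == pvNorm a) = none := by
        rw [List.find?_eq_none]
        intro p hp
        rw [PySem.List.mem_enumerate_iff] at hp
        obtain ⟨k, hk, hpk⟩ := hp
        subst hpk
        simpa using hpre_norm pre[k] (List.getElem_mem hk)
      rw [h1, Option.none_or, show PySem.List.enumerate (a :: post) (0 + (pre.length : Int))
          = ((0 : Int) + (pre.length : Int), a) :: PySem.List.enumerate post ((0 + (pre.length : Int)) + 1) from rfl]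
      rw [List.find?_cons_of_pos (by simp)]
      simp
    have hcand : pvTypeOkProp allowed_types (d.getD n []) = true ∧
        (pvRankB aliases).get? (pvNorm n) = some (pre.length : Int) := by
      refine ⟨hok, ?_⟩
      rw [hnna]; exact hrank
    have hmem : (n, d.getD n []) ∈ d.items := by
      rw [hitems]; exact List.mem_map.2 ⟨n, hnks, rfl⟩
    have hH : ∀ q ∈ d.items, ∀ s : Int, pvTypeOkProp allowed_types q.2 = true →
        (pvRankB aliases).get? (pvNorm q.1) = some s →
        (pre.length : Int) ≤ s ∧ (s = (pre.length : Int) → q = (n, d.getD n [])) := by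
      rintro ⟨q1, q2⟩ hq s hok' hr
      obtain ⟨hkmem, hq2⟩ := hitem_fact _ hq
      simp only [] at hkmem hq2 hok' hr
      obtain ⟨k, hk, hsk, hnorm⟩ := pv_rank_mem aliases (pvNorm q1) s hr
      have hge : pre.length ≤ k := by
        by_contra hlt0
        have hlt : k < pre.length := by omega
        have hxk : aliases[k] ∈ pre := by
          have hk' : k < (pre ++ a :: post).length := by rw [← heq]; exact hk
          have h1 : aliases[k] = (pre ++ a :: post)[k]'hk' := by
            congr 1
          rw [h1, List.getElem_append_left hlt]
          exact List.getElem_mem hlt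
        have hgx := hpre_none aliases[k] hxk
        rw [pvG_of_hit_some d.keys d allowed_types aliases[k] q1
          (by rw [hnorm]; exact pv_hit_self d.keys q1 hno hkmem)] at hgx
        have hokq : pvTypeOk d allowed_types q1 = true := by
          unfold pvTypeOk; rw [← hq2]; exact hok'
        rw [hokq] at hgx
        exact absurd hgx (by simp)
      refine ⟨by omega, ?_⟩
      intro hsr
      have hkpre : k = pre.length := by omega
      have haik : aliases[k] = a := by
        have hk' : k < (pre ++ a :: post).length := by rw [← heq]; exact hk
        have h1 : aliases[k] = (pre ++ a :: post)[k]'hk' := by congr 1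
        rw [h1]
        subst hkpre
        simp
      have hq1 : q1 = n := by
        apply List.inj_on_of_nodup_map hno hkmem hnks
        rw [← hnorm, haik, hnna]
      rw [hq1, hq2, hq1]
    have hlen : (pre.length : Int) < ((none : Option String), PySem.List.len aliases).2 := by
      simp only [PySem.List.len_eq, heq, List.length_append, List.length_cons]
      push_cast
      omega
    rw [pv_foldB_main (pvRankB aliases) allowed_types d.items
      (none, PySem.List.len aliases) n (d.getD n []) (pre.length : Int) hmem hcand hH hlen]
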